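-- pv_equiv track=rewrite | github.com/PeytonAndras/ais_project | transmission/signal_analysis.py | decode_nrzi_bits
-- ===== SOURCE A (Python) =====
-- from typing import Tuple, List
--
-- def decode_nrzi_bits(nrzi_bits) -> List[int]:
--     """Decode NRZI back to original bits"""
--     if len(nrzi_bits) == 0:
--         return []
--
--     decoded = []
--     previous_level = 0  # Start with 0
--
--     for current_level in nrzi_bits:
--         if current_level != previous_level:
--             decoded.append(1)  # Transition = 1
--         else:
--             decoded.append(0)  # No transition = 0
--         previous_level = current_level
--
--     return decoded
-- ===== SOURCE B (Python) =====
-- def decode_nrzi_bits(nrzi_bits):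
--     """Decode NRZI back to original bits via run-length encoding: each
--     maximal run of equal levels decodes to one transition marker followed
--     by zeros (the first run's marker is 1 only if its level is nonzero)."""
--     bits = list(nrzi_bits)
--     # pass 1: run-length encode into (value, count) runs
--     runs = []
--     i = 0
--     n = len(bits)
--     while i < n:
--         j = i + 1
--         while j < n and bits[j] == bits[i]:
--             j += 1
--         runs.append((bits[i], j - i))
--         i = j
--     # pass 2: each run starts with a transition marker, remainder is zeros
--     out = []
--     first = True
--     for value, count in runs:
--         out.append(int(value != 0) if first else 1)
--         out.extend([0] * (count - 1))
--         first = False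
--     return out
-- ===== Notes on version B (the rewrite author's own statement) =====
-- stated objective: alternative
-- what changed: Replaces the element-wise compare-to-predecessor loop with a two-stage algorithm: run-length encode the signal into (value,count) runs, then emit each run as one transition marker followed by count-1 zeros.
import Mathlib
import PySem

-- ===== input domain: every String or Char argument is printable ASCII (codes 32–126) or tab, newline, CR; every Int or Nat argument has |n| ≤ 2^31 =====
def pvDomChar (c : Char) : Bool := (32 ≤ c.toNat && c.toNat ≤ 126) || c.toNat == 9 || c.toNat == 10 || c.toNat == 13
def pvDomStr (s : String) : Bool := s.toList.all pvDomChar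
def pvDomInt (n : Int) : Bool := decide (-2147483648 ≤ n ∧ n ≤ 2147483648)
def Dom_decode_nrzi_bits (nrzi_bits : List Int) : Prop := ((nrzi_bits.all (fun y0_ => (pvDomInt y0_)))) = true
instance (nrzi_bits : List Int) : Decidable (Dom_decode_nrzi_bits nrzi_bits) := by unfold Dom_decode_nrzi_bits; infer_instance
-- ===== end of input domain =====

-- B replaces A's compare-to-predecessor accumulator loop with a two-stage
-- algorithm: run-length encode into (value,count) runs, then emit each run
-- as one transition marker followed by count-1 zeros (alternative).

-- ===== PORT A =====
-- loop state: (previous_level, decoded so far)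
def decode_nrzi_bits (nrzi_bits : List Int) : List Int :=
  if nrzi_bits.length = 0 then []
  else
    (nrzi_bits.foldl
      (fun (st : Int × List Int) current_level =>
        let decoded := if current_level ≠ st.1 then st.2 ++ [1] else st.2 ++ [0]
        (current_level, decoded))
      (0, [])).2

-- ===== PORT B =====
-- inner while loop of pass 1: length of the maximal prefix equal to v
def pvRunLen (v : Int) : List Int → Nat
  | [] => 0
  | x :: xs => if x = v then pvRunLen v xs + 1 else 0

-- outer while loop of pass 1: run-length encode into (value, count) runs
def pvRuns : List Int → List (Int × Nat)
  | [] => []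
  | x :: xs => (x, pvRunLen x xs + 1) :: pvRuns (xs.drop (pvRunLen x xs))
termination_by xs => xs.length
decreasing_by simp [List.length_drop]

-- pass 2: for-loop over the runs with the `first` flag as state
def pvEmit : Bool → List (Int × Nat) → List Int
  | _, [] => []
  | first, (v, k) :: rs =>
      ((if first then (if v ≠ 0 then (1 : Int) else 0) else 1) ::
        List.replicate (k - 1) 0) ++ pvEmit false rs

def decode_nrzi_bits_alt (nrzi_bits : List Int) : List Int :=
  pvEmit true (pvRuns nrzi_bits)

-- ===== PRECONDITION & SPEC =====
def Spec_decode_nrzi_bits (nrzi_bits : List Int) (out : List Int) : Prop := out = decode_nrzi_bits_alt nrzi_bits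
instance (nrzi_bits : List Int) (out : List Int) : Decidable (Spec_decode_nrzi_bits nrzi_bits out) := by unfold Spec_decode_nrzi_bits; infer_instance

-- ===== CLAIM (what is proved, stated in full; the proofs are below) =====
def Claim_equal_decode_nrzi_bits : Prop := ∀ (nrzi_bits : List Int), Dom_decode_nrzi_bits nrzi_bits → Spec_decode_nrzi_bits nrzi_bits (decode_nrzi_bits nrzi_bits)

-- ===== LEMMAS AND PROOFS =====

-- proof-only characterisation of A's loop from an arbitrary previous level
def pvAGo (p : Int) : List Int → List Int
  | [] => []
  | x :: xs => (if x ≠ p then (1 : Int) else 0) :: pvAGo x xs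

theorem pv_fold_eq (xs : List Int) (p : Int) (acc : List Int) :
    (xs.foldl
      (fun (st : Int × List Int) current_level =>
        let decoded := if current_level ≠ st.1 then st.2 ++ [1] else st.2 ++ [0]
        (current_level, decoded))
      (p, acc)).2 = acc ++ pvAGo p xs := by
  induction xs generalizing p acc with
  | nil => simp [pvAGo]
  | cons x xs ih =>
      simp only [List.foldl_cons, pvAGo]
      rw [ih]
      by_cases h : x ≠ p <;> simp [h]

-- the element right after the maximal run of v differs from v
theorem pv_drop_head_ne (v : Int) (xs : List Int) :
    ∀ y, (xs.drop (pvRunLen v xs)).head? = some y → y ≠ v := by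
  induction xs with
  | nil => intro y h; simp at h
  | cons x xs ih =>
      intro y h
      by_cases hx : x = v
      · subst hx
        simp only [pvRunLen] at h
        exact ih y h
      · simp only [pvRunLen, if_neg hx, List.drop_zero, List.head?_cons] at h
        have hxy := Option.some_inj.mp h
        subst hxy; exact hx

-- A's decoder emits zeros across a maximal run of the previous level
theorem pv_aGo_run (v : Int) (xs : List Int) :
    pvAGo v xs = List.replicate (pvRunLen v xs) 0 ++ pvAGo v (xs.drop (pvRunLen v xs)) := by
  induction xs with
  | nil => simp [pvRunLen]
  | cons x xs ih =>
      by_cases hx : x = v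
      · subst hx
        simp [pvRunLen, pvAGo, List.replicate_succ, ih]
      · simp [pvRunLen, hx, pvAGo]

-- main invariant: emitting the runs of xs equals A's decode from previous
-- level p, provided the flag is consistent with p
theorem pv_main : ∀ (n : Nat) (xs : List Int) (b : Bool) (p : Int),
    xs.length ≤ n →
    (b = true → p = 0) →
    (b = false → ∀ y, xs.head? = some y → y ≠ p) →
    pvEmit b (pvRuns xs) = pvAGo p xs := by
  intro n
  induction n with
  | zero =>
      intro xs b p hlen _ _
      have hx : xs = [] := List.eq_nil_of_length_eq_zero (Nat.le_zero.mp hlen)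
      subst hx; rw [pvRuns.eq_def]; simp [pvEmit, pvAGo]
  | succ n ih =>
      intro xs b p hlen ht hf
      cases xs with
      | nil => rw [pvRuns.eq_def]; simp [pvEmit, pvAGo]
      | cons x xs =>
          rw [pvRuns.eq_def]
          show pvEmit b ((x, pvRunLen x xs + 1) :: pvRuns (xs.drop (pvRunLen x xs))) = pvAGo p (x :: xs)
          rw [pvEmit]
          have hhead : (if b then (if x ≠ 0 then (1 : Int) else 0) else 1)
              = (if x ≠ p then (1 : Int) else 0) := by
            cases b with
            | true => rw [ht rfl]; simp
            | false =>
                have hne : x ≠ p := hf rfl x rfl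
                simp [hne]
          have htail : pvEmit false (pvRuns (xs.drop (pvRunLen x xs))) = pvAGo x (xs.drop (pvRunLen x xs)) := by
            apply ih _ false x
            · calc (xs.drop (pvRunLen x xs)).length ≤ xs.length := by
                    simp [List.length_drop]
                 _ ≤ n := by simpa using Nat.lt_succ_iff.mp (Nat.lt_of_lt_of_le (Nat.lt_succ_of_le (Nat.le_refl _)) hlen)
            · intro h; exact absurd h (by simp)
            · intro _; exact pv_drop_head_ne x xs
          rw [hhead, htail]
          show (if x ≠ p then (1 : Int) else 0) :: (List.replicate (pvRunLen x xs + 1 - 1) 0 ++ pvAGo x (xs.drop (pvRunLen x xs))) = pvAGo p (x :: xs)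
          rw [pvAGo]
          simp only [Nat.add_sub_cancel]
          rw [← pv_aGo_run]

-- ===== VERDICT (by name: the statement is the Claim_ definition above) =====
theorem decode_nrzi_bits_spec : Claim_equal_decode_nrzi_bits := by
  intro xs _
  unfold Spec_decode_nrzi_bits decode_nrzi_bits decode_nrzi_bits_alt
  cases xs with
  | nil => rw [pvRuns.eq_def]; simp [pvEmit]
  | cons x xs =>
      rw [if_neg (by simp), pv_fold_eq]
      rw [pv_main ((x :: xs).length) (x :: xs) true 0 (Nat.le_refl _) (fun _ => rfl) (by simp)]
      simp
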